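-- pv_equiv track=rewrite | github.com/MultiQC/MultiQC | multiqc/modules/checkqc/checkqc.py | _get_warning_error
-- ===== SOURCE A (Python) =====
-- def _get_warning_error(data):
--     warning = False
--     error = False
--     for sample in data:
--         if "missing_error" in data[sample]:
--             error = True
--         if "missing_warning" in data[sample]:
--             warning = True
--         if warning and error:
--             break
--     return warning, error
-- ===== SOURCE B (Python) =====
-- def _get_warning_error(data):
--     error = any("missing_error" in data[s] for s in data)
--     warning = any("missing_warning" in data[s] for s in data)
--     return warning, error
-- ===== Notes on version B (the rewrite author's own statement) =====
-- stated objective: simpler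
-- what changed: Replaces the single fused loop with mutable flags and a combined early break by two independent short-circuiting any() scans, one per flag.
import Mathlib
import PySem

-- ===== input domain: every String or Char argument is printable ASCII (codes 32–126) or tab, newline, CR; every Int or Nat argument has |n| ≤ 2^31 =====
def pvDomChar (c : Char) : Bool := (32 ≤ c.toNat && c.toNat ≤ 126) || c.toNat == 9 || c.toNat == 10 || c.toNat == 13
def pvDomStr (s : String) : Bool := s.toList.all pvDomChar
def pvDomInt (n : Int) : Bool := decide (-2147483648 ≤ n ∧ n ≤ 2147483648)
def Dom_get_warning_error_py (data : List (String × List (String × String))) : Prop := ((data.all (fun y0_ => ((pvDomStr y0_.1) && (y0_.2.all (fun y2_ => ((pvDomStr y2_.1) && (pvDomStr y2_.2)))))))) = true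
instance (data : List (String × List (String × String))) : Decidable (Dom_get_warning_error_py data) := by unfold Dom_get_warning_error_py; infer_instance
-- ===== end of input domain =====

-- B replaces A's single fused loop (two mutable flags, combined early break) with two
-- independent short-circuiting any() scans over the sample names; same result, simpler decomposition.


-- ===== PORT A =====
-- value lookup data[sample] (sample always a key of data when the loop reaches it)
def pvLookup (data : List (String × List (String × String))) (s : String) :
    PySem.Dict String String :=
  PySem.Dict.mk (((PySem.Dict.mk data).get? s).getD [])

-- the for-loop of A: carries both flags, breaks when both are set
def pvLoopA (data : List (String × List (String × String))) :
    List String → Bool → Bool → Bool × Bool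
  | [], w, e => (w, e)
  | s :: rest, w, e =>
    let e' := if (pvLookup data s).contains "missing_error" then true else e
    let w' := if (pvLookup data s).contains "missing_warning" then true else w
    if w' && e' then (w', e') else pvLoopA data rest w' e'

def get_warning_error_py (data : List (String × List (String × String))) : Bool × Bool :=
  pvLoopA data (data.map (·.1)) false false

-- ===== PORT B =====
-- two independent short-circuiting any() scans over the sample names, one per flag
def get_warning_error_py_alt (data : List (String × List (String × String))) : Bool × Bool :=
  let error := (data.map (·.1)).any (fun s => (pvLookup data s).contains "missing_error")
  let warning := (data.map (·.1)).any (fun s => (pvLookup data s).contains "missing_warning")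
  (warning, error)

-- ===== PRECONDITION & SPEC =====
def Spec_get_warning_error_py (data : List (String × List (String × String))) (out : Bool × Bool) : Prop := out = get_warning_error_py_alt data
instance (data : List (String × List (String × String))) (out : Bool × Bool) : Decidable (Spec_get_warning_error_py data out) := by unfold Spec_get_warning_error_py; infer_instance

-- ===== CLAIM (what is proved, stated in full; the proofs are below) =====
def Claim_equal_get_warning_error_py : Prop := ∀ (data : List (String × List (String × String))), Dom_get_warning_error_py data → Spec_get_warning_error_py data (get_warning_error_py data)

-- ===== LEMMAS AND PROOFS =====
-- A's loop with accumulated flags computes the two any-scans (the break is harmless: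
-- once both flags are true the remaining samples cannot change them)
theorem pvLoopA_eq (data : List (String × List (String × String))) :
    ∀ (keys : List String) (w e : Bool),
    pvLoopA data keys w e =
      (w || keys.any (fun s => (pvLookup data s).contains "missing_warning"),
       e || keys.any (fun s => (pvLookup data s).contains "missing_error")) := by
  intro keys
  induction keys with
  | nil => intro w e; simp [pvLoopA]
  | cons s rest ih =>
    intro w e
    simp only [pvLoopA, List.any_cons]
    cases hw : (pvLookup data s).contains "missing_warning" <;>
      cases he : (pvLookup data s).contains "missing_error" <;>
        cases w <;> cases e <;> simp [ih]

-- ===== VERDICT (by name: the statement is the Claim_ definition above) =====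
theorem get_warning_error_py_spec : Claim_equal_get_warning_error_py := by
  intro data _
  unfold Spec_get_warning_error_py get_warning_error_py get_warning_error_py_alt
  rw [pvLoopA_eq]
  simp
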